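-- pv_equiv track=rewrite | github.com/yildiziptv/turktv | routes/playlist_builder.py | parse_playlist_items
-- ===== SOURCE A (Python) =====
-- from typing import Iterator, List, Dict
--
-- def parse_playlist_items(lines: List[str]) -> List[List[str]]:
--     """Raggruppa le righe in elementi (canali)."""
--     items = []
--     current_item = []
--
--     for line in lines:
--         stripped = line.strip()
--         if stripped.startswith('#EXTM3U') or stripped.startswith('#EXT-X-VERSION'):
--             continue
--
--         current_item.append(line)
--         # Se la riga non è un commento/direttiva e non è vuota, è l'URL (fine item)
--         if stripped and not stripped.startswith('#'):
--             items.append(current_item)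
--             current_item = []
--
--     # Gestione eventuali righe orfane alla fine
--     if current_item:
--         items.append(current_item)
--
--     return items
-- ===== SOURCE B (Python) =====
-- def _kept(line):
--     s = line.strip()
--     return not (s.startswith('#EXTM3U') or s.startswith('#EXT-X-VERSION'))
--
-- def _is_url(line):
--     s = line.strip()
--     return bool(s) and not s.startswith('#')
--
-- def parse_playlist_items(lines):
--     """Group lines into channel items, built back-to-front."""
--     kept = [l for l in lines if _kept(l)]
--     rev_groups = []  # groups in reverse order, each group's lines reversed
--     for line in reversed(kept):
--         if _is_url(line) or not rev_groups:
--             rev_groups.append([line])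
--         else:
--             rev_groups[-1].append(line)
--     return [g[::-1] for g in reversed(rev_groups)]
-- ===== Notes on version B (the rewrite author's own statement) =====
-- stated objective: alternative
-- what changed: A does one forward pass with a current-item accumulator flushed at each URL line and at the end; B first filters out header lines, then builds the groups back-to-front by walking the filtered list in reverse, starting a new group at each URL line and appending earlier lines into the open group, reversing everything at the end.
import Mathlib
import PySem

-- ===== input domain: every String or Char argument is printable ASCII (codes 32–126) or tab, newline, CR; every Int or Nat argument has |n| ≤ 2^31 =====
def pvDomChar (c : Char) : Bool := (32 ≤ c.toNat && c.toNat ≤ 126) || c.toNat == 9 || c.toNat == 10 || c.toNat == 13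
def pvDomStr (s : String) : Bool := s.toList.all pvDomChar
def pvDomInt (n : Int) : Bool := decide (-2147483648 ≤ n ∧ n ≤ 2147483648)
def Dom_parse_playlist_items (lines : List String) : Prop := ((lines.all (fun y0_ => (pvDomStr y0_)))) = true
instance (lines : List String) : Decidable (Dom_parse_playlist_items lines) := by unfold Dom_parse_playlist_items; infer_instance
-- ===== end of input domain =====

-- B builds the items back-to-front over a pre-filtered list instead of A's forward pass with a flushed accumulator; objective: alternative (same cost).

-- ===== PORT A =====
-- one loop iteration of A: skip headers, append line to current item, flush on a URL line
def pvStepA (p : List (List String) × List String) (line : String) : List (List String) × List String :=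
  let stripped := PySem.Str.strip line
  if PySem.Str.startswith stripped "#EXTM3U" || PySem.Str.startswith stripped "#EXT-X-VERSION" then p
  else
    let cur := p.2 ++ [line]
    if decide (stripped ≠ "") && !(PySem.Str.startswith stripped "#") then (p.1 ++ [cur], ([] : List String))
    else (p.1, cur)

def parse_playlist_items (lines : List String) : List (List String) :=
  let st := lines.foldl pvStepA ([], [])
  if st.2 ≠ [] then st.1 ++ [st.2] else st.1

-- ===== PORT B =====
-- _kept(line) of Source B
def pvKeep (line : String) : Bool :=
  let s := PySem.Str.strip line
  !(PySem.Str.startswith s "#EXTM3U" || PySem.Str.startswith s "#EXT-X-VERSION")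

-- _is_url(line) of Source B
def pvIsUrl (line : String) : Bool :=
  let s := PySem.Str.strip line
  decide (s ≠ "") && !(PySem.Str.startswith s "#")

-- one iteration of Source B's reversed loop (rev_groups[-1] is total in Source B since the list is non-empty there)
def pvStepB (rg : List (List String)) (line : String) : List (List String) :=
  if pvIsUrl line || rg.isEmpty then rg ++ [[line]]
  else rg.dropLast ++ [rg.getLastD [] ++ [line]]

-- g[::-1] is exactly List.reverse
def parse_playlist_items_alt (lines : List String) : List (List String) :=
  let kept := lines.filter pvKeep
  let revGroups := kept.reverse.foldl pvStepB []
  revGroups.reverse.map List.reverse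

-- ===== PRECONDITION & SPEC =====
def Spec_parse_playlist_items (lines : List String) (out : List (List String)) : Prop := out = parse_playlist_items_alt lines
instance (lines : List String) (out : List (List String)) : Decidable (Spec_parse_playlist_items lines out) := by unfold Spec_parse_playlist_items; infer_instance

-- ===== CLAIM (what is proved, stated in full; the proofs are below) =====
def Claim_equal_parse_playlist_items : Prop := ∀ (lines : List String), Dom_parse_playlist_items lines → Spec_parse_playlist_items lines (parse_playlist_items lines)

-- ===== LEMMAS AND PROOFS =====

-- common specification: the grouping both programs compute on the filtered lines
def pvGroups : List String → List (List String)
  | [] => []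
  | l :: rest =>
    if pvIsUrl l then [l] :: pvGroups rest
    else match pvGroups rest with
      | [] => [[l]]
      | g :: gs => (l :: g) :: gs

-- prepend a pending (possibly empty) current item onto the first group
def pvAttach (cur : List String) (gs : List (List String)) : List (List String) :=
  if cur = [] then gs else
    match gs with
    | [] => [cur]
    | g :: gs' => (cur ++ g) :: gs'

lemma pvStepA_eq (p : List (List String) × List String) (line : String) :
    pvStepA p line =
      if pvKeep line then
        (if pvIsUrl line then (p.1 ++ [p.2 ++ [line]], ([] : List String)) else (p.1, p.2 ++ [line]))
      else p := by
  simp only [pvStepA, pvKeep, pvIsUrl, Bool.not_or]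
  split_ifs with h1 h2 h3 h4 h5 <;> simp_all

lemma lemA (xs : List String) : ∀ (items : List (List String)) (cur : List String),
    (let st := xs.foldl pvStepA (items, cur);
     if st.2 ≠ [] then st.1 ++ [st.2] else st.1)
    = items ++ pvAttach cur (pvGroups (xs.filter pvKeep)) := by
  induction xs with
  | nil =>
    intro items cur
    simp only [List.foldl_nil, List.filter_nil, pvGroups, pvAttach]
    split_ifs with h <;> simp_all
  | cons x xs ih =>
    intro items cur
    simp only [List.foldl_cons, pvStepA_eq, List.filter_cons]
    by_cases hk : pvKeep x
    · by_cases hu : pvIsUrl x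
      · simp only [hk, hu, if_pos, ih]
        simp [pvGroups, hu, pvAttach]
      · simp only [hk, hu, if_pos, ih]
        simp only [pvGroups, hu, if_neg, Bool.false_eq_true, not_false_iff]
        cases hg : pvGroups (xs.filter pvKeep) with
        | nil => simp [pvAttach]
        | cons g gs => by_cases hc : cur = [] <;> simp [pvAttach, hc]
    · simp [hk, ih]

lemma lemB (kept : List String) :
    ((kept.reverse.foldl pvStepB []).reverse.map List.reverse) = pvGroups kept := by
  rw [List.foldl_reverse]
  induction kept with
  | nil => simp [pvGroups]
  | cons l rest ih =>
    simp only [List.foldr_cons]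
    set s := rest.foldr (fun x acc => pvStepB acc x) [] with hs
    by_cases hu : pvIsUrl l
    · simp [pvStepB, hu, pvGroups, ih]
    · rcases s.eq_nil_or_concat with hnil | ⟨ini, la, hconc⟩
      · have hg : pvGroups rest = [] := by rw [← ih, hnil]; simp
        simp [pvStepB, hu, hnil, pvGroups, hg]
      · have hne : s ≠ [] := by rw [hconc]; simp
        simp only [pvStepB, hu, Bool.false_or]
        rw [if_neg (by simp [List.isEmpty_iff, hne])]
        rw [hconc] at ih ⊢
        rw [pvGroups, if_neg (by simp [hu]), ← ih]
        simp

-- ===== VERDICT (by name: the statement is the Claim_ definition above) =====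
theorem parse_playlist_items_spec : Claim_equal_parse_playlist_items := by
  intro lines _
  unfold Spec_parse_playlist_items parse_playlist_items parse_playlist_items_alt
  rw [lemB]
  simpa [pvAttach] using lemA lines [] []
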